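-- pv_equiv track=rewrite | github.com/pspdev/psplibdoc | make_statistics.py | html_single_library
-- ===== SOURCE A (Python) =====
-- HTML_STATUS = [
--     # for both obfuscated and non-obfuscated
--     ("known", "green", "matching the name hash"),
--     # for non-obfuscated
--     ("unknown", "orange", "unknown"),
--     ("wrong", "red", "not matching the name hash"),
--     # for obfuscated
--     ("nok_from_previous", "yellow", "obfuscated but matching a previous non-obfuscated name"),
--     ("nok_dubious", "brown", "obfuscated but found from an unknown source"),
--     ("unknown_nonobf", "orange", "unknown and non-obfuscated"),
--     ("unknown_obf", "grey", "unknown but obfuscated")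
-- ]
--
-- def find_html_status(status):
--     for (s, color, desc) in HTML_STATUS:
--         if s == status:
--             return (color, desc)
--
-- def html_single_library(module, lib, stats_bynid, versions):
--     output = f"""<!DOCTYPE html>
-- <html>
-- <title>PSP NID Status for {lib} in {module}</title>
-- <meta name="viewport" content="width=device-width, initial-scale=1">
-- <link rel="stylesheet" href="https://www.w3schools.com/w3css/4/w3.css">
-- <body>
-- <div class="w3-container" style="height:100vh; width:100vw; overflow: scroll;">
-- <h1>{module}: {lib}</h1>
-- <p>
-- This page contains the status of all the NIDs from the {lib} library inside the {module} module.<br />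
-- Hover a cell to know the meaning of the color. <br />
-- "..." means the given name is the same as the one on its left. <br />
-- </p>
-- """
--     # Output the header row (containing all the firmware versions)
--     output += """<table class="w3-table"><tr><th>NID</th>"""
--     for v in versions:
--         output += f"<th>{v}</th>"
--     output += '</tr>'
--     # Sort NIDs by the first firmware version they appear in, then by the names associated to them
--     sorted_nids = []
--     sources = {}
--     for v in versions:
--         ver_nids = []
--         for nid in stats_bynid:
--             if v in stats_bynid[nid]:
--                 (_, name, source) = stats_bynid[nid][v]
--                 sources[name] = source
--                 ver_nids.append((name, nid))
--         for (_, nid) in sorted(ver_nids):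
--             if nid not in sorted_nids:
--                 sorted_nids.append(nid)
--     # For each NID, show the associated name, status & a tooltip explaining its status
--     for nid in sorted_nids:
--         output += f"<tr><td>{nid}</td>"
--         last_name = None
--         for v in versions:
--             if v not in stats_bynid[nid]:
--                 output += "<td></td>"
--             else:
--                 (status, name, source) = stats_bynid[nid][v]
--                 show_name = name
--                 source_str = ''
--                 if name == last_name:
--                     show_name = '...'
--                 elif source != '' and source != 'matching':
--                     source_str = ' (source: ' + source + ')'
--                 last_name = name
--                 (color, desc) = find_html_status(status)
--                 output += f"""<td class="w3-{color}"><div class="w3-tooltip">{show_name}{source_str}<span style="position:absolute;left:0;bottom:18px" class="w3-text w3-tag">NID is {desc}</span></div></td>"""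
--         output += "</tr>"
--     output += "</table></div></body></html>"
--     return output
-- ===== SOURCE B (Python) =====
-- # B: same HTML output; one pass recording each NID's first (version-index, name, nid)
-- # triple, then a single global sort replaces A's per-version sort+dedup append (and the
-- # unused `sources` dict is dropped); rows are built as joined strings instead of +=.
-- HTML_STATUS = [
--     ("known", "green", "matching the name hash"),
--     ("unknown", "orange", "unknown"),
--     ("wrong", "red", "not matching the name hash"),
--     ("nok_from_previous", "yellow", "obfuscated but matching a previous non-obfuscated name"),
--     ("nok_dubious", "brown", "obfuscated but found from an unknown source"),
--     ("unknown_nonobf", "orange", "unknown and non-obfuscated"),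
--     ("unknown_obf", "grey", "unknown but obfuscated")
-- ]
-- STATUS_MAP = {s: (color, desc) for (s, color, desc) in HTML_STATUS}
--
-- def _render_row(nid, entries, versions):
--     cells = []
--     last_name = None
--     for v in versions:
--         if v not in entries:
--             cells.append("<td></td>")
--         else:
--             (status, name, source) = entries[v]
--             show_name = name
--             source_str = ''
--             if name == last_name:
--                 show_name = '...'
--             elif source != '' and source != 'matching':
--                 source_str = ' (source: ' + source + ')'
--             last_name = name
--             (color, desc) = STATUS_MAP[status]
--             cells.append(f"""<td class="w3-{color}"><div class="w3-tooltip">{show_name}{source_str}<span style="position:absolute;left:0;bottom:18px" class="w3-text w3-tag">NID is {desc}</span></div></td>""")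
--     return f"<tr><td>{nid}</td>" + "".join(cells) + "</tr>"
--
-- def html_single_library(module, lib, stats_bynid, versions):
--     head = f"""<!DOCTYPE html>
-- <html>
-- <title>PSP NID Status for {lib} in {module}</title>
-- <meta name="viewport" content="width=device-width, initial-scale=1">
-- <link rel="stylesheet" href="https://www.w3schools.com/w3css/4/w3.css">
-- <body>
-- <div class="w3-container" style="height:100vh; width:100vw; overflow: scroll;">
-- <h1>{module}: {lib}</h1>
-- <p>
-- This page contains the status of all the NIDs from the {lib} library inside the {module} module.<br />
-- Hover a cell to know the meaning of the color. <br />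
-- "..." means the given name is the same as the one on its left. <br />
-- </p>
-- """
--     header_row = '<table class="w3-table"><tr><th>NID</th>' + "".join(f"<th>{v}</th>" for v in versions) + "</tr>"
--     first_seen = {}
--     for nid, entries in stats_bynid.items():
--         for i, v in enumerate(versions):
--             if v in entries:
--                 first_seen[nid] = (i, entries[v][1], nid)
--                 break
--     rows = "".join(_render_row(nid, stats_bynid[nid], versions)
--                    for (_, _, nid) in sorted(first_seen.values()))
--     return head + header_row + rows + "</table></div></body></html>"
-- ===== Notes on version B (the rewrite author's own statement) =====
-- stated objective: simpler
-- what changed: A's per-version sort-and-append-dedup ordering loop (with an unused `sources` dict) is replaced by one pass recording each NID's first (version-index, name, nid) triple followed by a single global sort; the += string accumulation is replaced by joined comprehensions with a per-row helper, and the linear status scan by a precomputed status dict.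
import Mathlib
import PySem

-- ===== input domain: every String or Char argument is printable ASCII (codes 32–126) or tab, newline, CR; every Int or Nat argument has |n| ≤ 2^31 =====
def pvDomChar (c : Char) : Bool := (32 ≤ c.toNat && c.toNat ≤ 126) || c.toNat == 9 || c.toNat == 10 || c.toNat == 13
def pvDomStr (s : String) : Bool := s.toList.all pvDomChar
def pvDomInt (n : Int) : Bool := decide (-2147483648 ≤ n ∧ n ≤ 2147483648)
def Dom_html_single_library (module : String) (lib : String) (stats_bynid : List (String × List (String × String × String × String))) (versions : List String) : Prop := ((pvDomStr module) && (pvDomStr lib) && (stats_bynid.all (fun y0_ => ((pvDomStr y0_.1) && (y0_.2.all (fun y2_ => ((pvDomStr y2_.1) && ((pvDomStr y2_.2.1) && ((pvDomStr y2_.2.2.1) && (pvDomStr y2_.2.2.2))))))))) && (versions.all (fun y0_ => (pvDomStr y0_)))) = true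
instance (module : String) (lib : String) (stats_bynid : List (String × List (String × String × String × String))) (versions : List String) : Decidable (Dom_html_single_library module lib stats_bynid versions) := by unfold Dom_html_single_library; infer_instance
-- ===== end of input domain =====

-- B replaces A's per-version sort+dedup ordering by one first-seen pass and a single
-- global sort, and A's += string accumulation by joined comprehensions (objective: simpler).

-- ===== PORT A =====
def pvHTML_STATUS : List (String × String × String) :=
  [("known", "green", "matching the name hash"),
   ("unknown", "orange", "unknown"),
   ("wrong", "red", "not matching the name hash"),
   ("nok_from_previous", "yellow", "obfuscated but matching a previous non-obfuscated name"),
   ("nok_dubious", "brown", "obfuscated but found from an unknown source"),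
   ("unknown_nonobf", "orange", "unknown and non-obfuscated"),
   ("unknown_obf", "grey", "unknown but obfuscated")]

-- find_html_status: scan for the first matching entry.  Python returns None when the
-- status is unknown (→ TypeError when the caller unpacks it, excluded by Pre_); the
-- port returns none there and the caller substitutes a dummy pair.
def pvFindHtmlStatus : List (String × String × String) → String → Option (String × String)
  | [], _ => none
  | (s, color, desc) :: rest, status =>
    if s == status then some (color, desc) else pvFindHtmlStatus rest status

def html_single_library (module : String) (lib : String)
    (stats_bynid : List (String × List (String × String × String × String)))
    (versions : List String) : String :=
  -- the harness passes the two dict arguments as association lists: rebuild the dicts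
  let stats : PySem.Dict String (PySem.Dict String (String × String × String)) :=
    PySem.Dict.ofList (stats_bynid.map (fun p => (p.1, PySem.Dict.ofList p.2)))
  let output := "<!DOCTYPE html>\n<html>\n<title>PSP NID Status for " ++ lib ++ " in " ++ module ++ "</title>\n<meta name=\"viewport\" content=\"width=device-width, initial-scale=1\">\n<link rel=\"stylesheet\" href=\"https://www.w3schools.com/w3css/4/w3.css\">\n<body>\n<div class=\"w3-container\" style=\"height:100vh; width:100vw; overflow: scroll;\">\n<h1>" ++ module ++ ": " ++ lib ++ "</h1>\n<p>\nThis page contains the status of all the NIDs from the " ++ lib ++ " library inside the " ++ module ++ " module.<br />\nHover a cell to know the meaning of the color. <br />\n\"...\" means the given name is the same as the one on its left. <br />\n</p>\n"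
  let output := output ++ "<table class=\"w3-table\"><tr><th>NID</th>"
  let output := versions.foldl (fun out v => out ++ ("<th>" ++ v ++ "</th>")) output
  let output := output ++ "</tr>"
  -- sorted_nids / sources loop (sources is dead state, as in the Python)
  let st := versions.foldl (fun (st : List String × PySem.Dict String String) v =>
      let inner := stats.items.foldl
        (fun (q : List (String × String) × PySem.Dict String String) p =>
          match p.2.get? v with
          | some t => (q.1 ++ [(t.2.1, p.1)], q.2.insert t.2.1 t.2.2)
          | none => q) (([] : List (String × String)), st.2)
      ((PySem.List.sorted2 inner.1 (fun q => q.1) (fun q => q.2)).foldl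
          (fun sn q => if q.2 ∈ sn then sn else sn ++ [q.2]) st.1, inner.2))
    (([] : List String), (PySem.Dict.empty : PySem.Dict String String))
  let sorted_nids := st.1
  -- render each NID's row
  let output := sorted_nids.foldl (fun out nid =>
      -- stats_bynid[nid]: nid is always a key here, the default is never used
      let entries := (stats.get? nid).getD PySem.Dict.empty
      let row := versions.foldl (fun (s : String × Option String) v =>
          match entries.get? v with
          | none => (s.1 ++ "<td></td>", s.2)
          | some t =>
            let sn_ss : String × String :=
              if s.2 = some t.2.1 then ("...", "")
              else if t.2.2 ≠ "" ∧ t.2.2 ≠ "matching" then (t.2.1, " (source: " ++ t.2.2 ++ ")")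
              else (t.2.1, "")
            let cd := (pvFindHtmlStatus pvHTML_STATUS t.1).getD ("", "")
            (s.1 ++ ("<td class=\"w3-" ++ cd.1 ++ "\"><div class=\"w3-tooltip\">" ++ sn_ss.1 ++ sn_ss.2 ++ "<span style=\"position:absolute;left:0;bottom:18px\" class=\"w3-text w3-tag\">NID is " ++ cd.2 ++ "</span></div></td>"), some t.2.1))
        (out ++ ("<tr><td>" ++ nid ++ "</td>"), (none : Option String))
      row.1 ++ "</tr>") output
  output ++ "</table></div></body></html>"

-- ===== PORT B =====
def pvStatusMap : PySem.Dict String (String × String) :=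
  PySem.Dict.ofList (pvHTML_STATUS.map (fun t => (t.1, t.2)))

def pvRenderRow (nid : String) (entries : PySem.Dict String (String × String × String))
    (versions : List String) : String :=
  let st := versions.foldl (fun (s : List String × Option String) v =>
      match entries.get? v with
      | none => (s.1 ++ ["<td></td>"], s.2)
      | some t =>
        let sn_ss : String × String :=
          if s.2 = some t.2.1 then ("...", "")
          else if t.2.2 ≠ "" ∧ t.2.2 ≠ "matching" then (t.2.1, " (source: " ++ t.2.2 ++ ")")
          else (t.2.1, "")
        let cd := (pvStatusMap.get? t.1).getD ("", "")
        (s.1 ++ ["<td class=\"w3-" ++ cd.1 ++ "\"><div class=\"w3-tooltip\">" ++ sn_ss.1 ++ sn_ss.2 ++ "<span style=\"position:absolute;left:0;bottom:18px\" class=\"w3-text w3-tag\">NID is " ++ cd.2 ++ "</span></div></td>"], some t.2.1))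
    (([] : List String), (none : Option String))
  "<tr><td>" ++ nid ++ "</td>" ++ PySem.Str.join "" st.1 ++ "</tr>"

def html_single_library_alt (module : String) (lib : String)
    (stats_bynid : List (String × List (String × String × String × String)))
    (versions : List String) : String :=
  let stats : PySem.Dict String (PySem.Dict String (String × String × String)) :=
    PySem.Dict.ofList (stats_bynid.map (fun p => (p.1, PySem.Dict.ofList p.2)))
  let head := "<!DOCTYPE html>\n<html>\n<title>PSP NID Status for " ++ lib ++ " in " ++ module ++ "</title>\n<meta name=\"viewport\" content=\"width=device-width, initial-scale=1\">\n<link rel=\"stylesheet\" href=\"https://www.w3schools.com/w3css/4/w3.css\">\n<body>\n<div class=\"w3-container\" style=\"height:100vh; width:100vw; overflow: scroll;\">\n<h1>" ++ module ++ ": " ++ lib ++ "</h1>\n<p>\nThis page contains the status of all the NIDs from the " ++ lib ++ " library inside the " ++ module ++ " module.<br />\nHover a cell to know the meaning of the color. <br />\n\"...\" means the given name is the same as the one on its left. <br />\n</p>\n"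
  let header_row := "<table class=\"w3-table\"><tr><th>NID</th>" ++ PySem.Str.join "" (versions.map (fun v => "<th>" ++ v ++ "</th>")) ++ "</tr>"
  let first_seen := stats.items.foldl
    (fun (fs : PySem.Dict String (Int × String × String)) p =>
      match (PySem.List.enumerate versions 0).find? (fun q => p.2.contains q.2) with
      | some iv =>
        match p.2.get? iv.2 with
        | some t => fs.insert p.1 (iv.1, t.2.1, p.1)
        | none => fs   -- unreachable: find? succeeded on contains
      | none => fs) PySem.Dict.empty
  let rows := PySem.Str.join ""
    ((PySem.List.sorted first_seen.values (fun t => toLex (t.1, toLex (t.2.1, t.2.2)))).map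
      (fun t => pvRenderRow t.2.2 ((stats.get? t.2.2).getD PySem.Dict.empty) versions))
  head ++ header_row ++ rows ++ "</table></div></body></html>"

-- ===== PRECONDITION & SPEC =====
-- Pre_ excludes exactly the inputs on which Python A raises: some rendered cell carries a
-- status string that is none of the seven HTML_STATUS keys (find_html_status returns None
-- and A's tuple unpacking raises TypeError; B raises KeyError there too).
def Pre_html_single_library (module : String) (lib : String) (stats_bynid : List (String × List (String × String × String × String))) (versions : List String) : Prop :=
  ((PySem.Dict.ofList (stats_bynid.map (fun p => (p.1, PySem.Dict.ofList p.2)))).items.all (fun p =>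
    versions.all (fun v =>
      match p.2.get? v with
      | some r => decide (r.1 ∈ ["known", "unknown", "wrong", "nok_from_previous", "nok_dubious", "unknown_nonobf", "unknown_obf"])
      | none => true))) = true

instance (module : String) (lib : String) (stats_bynid : List (String × List (String × String × String × String))) (versions : List String) : Decidable (Pre_html_single_library module lib stats_bynid versions) := by
  unfold Pre_html_single_library; infer_instance

def pvWitness_html_single_library : String × String × (List (String × List (String × String × String × String))) × List String :=
  ("module", "lib", [("0xDEAD", [("1.00", ("known", "foo", ""))]), ("0xBEEF", [("1.50", ("unknown", "bar", "psp"))])], ["1.00", "1.50"])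

def Spec_html_single_library (module : String) (lib : String) (stats_bynid : List (String × List (String × String × String × String))) (versions : List String) (out : String) : Prop := out = html_single_library_alt module lib stats_bynid versions
instance (module : String) (lib : String) (stats_bynid : List (String × List (String × String × String × String))) (versions : List String) (out : String) : Decidable (Spec_html_single_library module lib stats_bynid versions out) := by unfold Spec_html_single_library; infer_instance

-- ===== CLAIM (what is proved, stated in full; the proofs are below) =====
def Claim_equal_html_single_library : Prop := ∀ (module : String) (lib : String) (stats_bynid : List (String × List (String × String × String × String))) (versions : List String), Dom_html_single_library module lib stats_bynid versions → Pre_html_single_library module lib stats_bynid versions → Spec_html_single_library module lib stats_bynid versions (html_single_library module lib stats_bynid versions)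

-- ===== LEMMAS AND PROOFS =====

-- ---- proof-side shorthands ----

abbrev pvRowT : Type := String × PySem.Dict String (String × String × String)

def pvStats (stats_bynid : List (String × List (String × String × String × String))) :
    PySem.Dict String (PySem.Dict String (String × String × String)) :=
  PySem.Dict.ofList (stats_bynid.map (fun p => (p.1, PySem.Dict.ofList p.2)))

-- index of the first version a row's dict contains (= versions.length if none)
def pvFIdx (versions : List String) (p : pvRowT) : Nat :=
  versions.findIdx (fun v => p.2.contains v)

-- the name recorded at that first version
def pvNm (versions : List String) (p : pvRowT) : String :=
  (((versions[pvFIdx versions p]?).bind (fun v => p.2.get? v)).map (fun t => t.2.1)).getD ""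

def pvNmAt (v : String) (p : pvRowT) : String :=
  ((p.2.get? v).map (fun t => t.2.1)).getD ""

def pvTriple (versions : List String) (p : pvRowT) : Int × String × String :=
  ((pvFIdx versions p : Int), pvNm versions p, p.1)

def pvNewPairs (versions : List String) (items : List pvRowT) (k : Nat) :
    List (String × String) :=
  (items.filter (fun p => pvFIdx versions p == k)).map (fun p => (pvNm versions p, p.1))

def pvBlock (versions : List String) (items : List pvRowT) (k : Nat) : List String :=
  (PySem.List.sorted2 (pvNewPairs versions items k) (fun q => q.1) (fun q => q.2)).map (fun q => q.2)

def pvCCn (versions : List String) (items : List pvRowT) (m : Nat) : List String :=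
  (List.range m).flatMap (pvBlock versions items)

def pvBlockT (versions : List String) (items : List pvRowT) (k : Nat) :
    List (Int × String × String) :=
  (PySem.List.sorted2 (pvNewPairs versions items k) (fun q => q.1) (fun q => q.2)).map
    (fun q => ((k : Int), q.1, q.2))

def pvCCTn (versions : List String) (items : List pvRowT) (m : Nat) :
    List (Int × String × String) :=
  (List.range m).flatMap (pvBlockT versions items)

def pvKey3 (t : Int × String × String) : Lex (Int × Lex (String × String)) :=
  toLex (t.1, toLex (t.2.1, t.2.2))

-- the loop bodies of the two ports, as named functions (definitionally equal to the lambdas)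
def pvStepInner (v : String) (q : List (String × String) × PySem.Dict String String)
    (p : pvRowT) : List (String × String) × PySem.Dict String String :=
  match p.2.get? v with
  | some t => (q.1 ++ [(t.2.1, p.1)], q.2.insert t.2.1 t.2.2)
  | none => q

def pvStepOuter (items : List pvRowT) (st : List String × PySem.Dict String String)
    (v : String) : List String × PySem.Dict String String :=
  let inner := items.foldl (pvStepInner v) (([] : List (String × String)), st.2)
  ((PySem.List.sorted2 inner.1 (fun q => q.1) (fun q => q.2)).foldl
      (fun sn q => if q.2 ∈ sn then sn else sn ++ [q.2]) st.1, inner.2)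

def pvStepFS (versions : List String) (fs : PySem.Dict String (Int × String × String))
    (p : pvRowT) : PySem.Dict String (Int × String × String) :=
  match (PySem.List.enumerate versions 0).find? (fun q => p.2.contains q.2) with
  | some iv =>
    match p.2.get? iv.2 with
    | some t => fs.insert p.1 (iv.1, t.2.1, p.1)
    | none => fs
  | none => fs

def pvStepA (entries : PySem.Dict String (String × String × String))
    (s : String × Option String) (v : String) : String × Option String :=
  match entries.get? v with
  | none => (s.1 ++ "<td></td>", s.2)
  | some t =>
    let sn_ss : String × String :=
      if s.2 = some t.2.1 then ("...", "")
      else if t.2.2 ≠ "" ∧ t.2.2 ≠ "matching" then (t.2.1, " (source: " ++ t.2.2 ++ ")")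
      else (t.2.1, "")
    let cd := (pvFindHtmlStatus pvHTML_STATUS t.1).getD ("", "")
    (s.1 ++ ("<td class=\"w3-" ++ cd.1 ++ "\"><div class=\"w3-tooltip\">" ++ sn_ss.1 ++ sn_ss.2 ++ "<span style=\"position:absolute;left:0;bottom:18px\" class=\"w3-text w3-tag\">NID is " ++ cd.2 ++ "</span></div></td>"), some t.2.1)

def pvStepB (entries : PySem.Dict String (String × String × String))
    (s : List String × Option String) (v : String) : List String × Option String :=
  match entries.get? v with
  | none => (s.1 ++ ["<td></td>"], s.2)
  | some t =>
    let sn_ss : String × String :=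
      if s.2 = some t.2.1 then ("...", "")
      else if t.2.2 ≠ "" ∧ t.2.2 ≠ "matching" then (t.2.1, " (source: " ++ t.2.2 ++ ")")
      else (t.2.1, "")
    let cd := (pvStatusMap.get? t.1).getD ("", "")
    (s.1 ++ ["<td class=\"w3-" ++ cd.1 ++ "\"><div class=\"w3-tooltip\">" ++ sn_ss.1 ++ sn_ss.2 ++ "<span style=\"position:absolute;left:0;bottom:18px\" class=\"w3-text w3-tag\">NID is " ++ cd.2 ++ "</span></div></td>"], some t.2.1)

-- the canonical output both ports are shown to equal
def pvOut (module : String) (lib : String)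
    (stats_bynid : List (String × List (String × String × String × String)))
    (versions : List String) : String :=
  let stats := pvStats stats_bynid
  ("<!DOCTYPE html>\n<html>\n<title>PSP NID Status for " ++ lib ++ " in " ++ module ++ "</title>\n<meta name=\"viewport\" content=\"width=device-width, initial-scale=1\">\n<link rel=\"stylesheet\" href=\"https://www.w3schools.com/w3css/4/w3.css\">\n<body>\n<div class=\"w3-container\" style=\"height:100vh; width:100vw; overflow: scroll;\">\n<h1>" ++ module ++ ": " ++ lib ++ "</h1>\n<p>\nThis page contains the status of all the NIDs from the " ++ lib ++ " library inside the " ++ module ++ " module.<br />\nHover a cell to know the meaning of the color. <br />\n\"...\" means the given name is the same as the one on its left. <br />\n</p>\n")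
  ++ "<table class=\"w3-table\"><tr><th>NID</th>"
  ++ PySem.Str.join "" (versions.map (fun v => "<th>" ++ v ++ "</th>")) ++ "</tr>"
  ++ PySem.Str.join "" ((pvCCn versions stats.items versions.length).map
      (fun nid => pvRenderRow nid ((stats.get? nid).getD PySem.Dict.empty) versions))
  ++ "</table></div></body></html>"

-- ---- generic string lemmas ----

theorem pvJoin_nil : PySem.Str.join "" [] = "" := by
  apply String.toList_inj.mp
  simp [PySem.Str.toList_join, PySem.Chars.join_nil]

theorem pvJoin_cons (c : String) (cs : List String) :
    PySem.Str.join "" (c :: cs) = c ++ PySem.Str.join "" cs := by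
  apply String.toList_inj.mp
  cases cs with
  | nil => simp [PySem.Str.toList_join, PySem.Chars.join_singleton, PySem.Chars.join_nil,
      String.toList_append]
  | cons d ds => simp [PySem.Str.toList_join, PySem.Chars.join_cons_cons, String.toList_append]

theorem pvFoldlStr {α : Type} (l : List α) (f : α → String) (s : String) :
    l.foldl (fun o x => o ++ f x) s = s ++ PySem.Str.join "" (l.map f) := by
  induction l generalizing s with
  | nil => simp [pvJoin_nil]
  | cons x xs ih => simp only [List.foldl_cons, List.map_cons, pvJoin_cons, ih, String.append_assoc]

-- ---- sorted2 = sorted with a lexicographic key ----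

theorem pvSorted2_eq {α κ₁ κ₂ : Type} [LinearOrder κ₁] [LinearOrder κ₂]
    (xs : List α) (k1 : α → κ₁) (k2 : α → κ₂) :
    PySem.List.sorted2 xs k1 k2 = PySem.List.sorted xs (fun x => toLex (k1 x, k2 x)) := by
  show List.foldl _ [] xs = List.foldl _ [] xs
  have h : (fun a b => decide (k1 a < k1 b) || (!decide (k1 b < k1 a) && decide (k2 a < k2 b)))
      = (fun a b : α => decide (toLex (k1 a, k2 a) < toLex (k1 b, k2 b))) := by
    funext a b
    rcases lt_trichotomy (k1 a) (k1 b) with h | h | h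
    · simp [Prod.Lex.lt_iff, h, lt_asymm h]
    · simp [Prod.Lex.lt_iff, h]
    · simp [Prod.Lex.lt_iff, h, lt_asymm h, ne_of_gt h]
  rw [h]

theorem pvPairwise_lt_of_le_ne {α κ : Type} [LinearOrder κ] (key : α → κ) (l : List α)
    (hle : l.Pairwise (fun a b => key a ≤ key b)) (hnd : (l.map key).Nodup) :
    l.Pairwise (fun a b => key a < key b) := by
  have hne : l.Pairwise (fun a b => key a ≠ key b) := List.pairwise_map.mp hnd
  exact (hle.and hne).imp (fun h => lt_of_le_of_ne h.1 h.2)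

-- strict pairwise order on a sorted2 list whose second components are distinct
theorem pvSorted2_pairwise_lt (X : List (String × String)) (hnd : (X.map (fun q => q.2)).Nodup) :
    (PySem.List.sorted2 X (fun q => q.1) (fun q => q.2)).Pairwise
      (fun a b => toLex (a.1, a.2) < toLex (b.1, b.2)) := by
  rw [pvSorted2_eq]
  apply pvPairwise_lt_of_le_ne (fun q : String × String => toLex (q.1, q.2))
  · exact PySem.List.sorted_pairwise _ _
  · have hX : X.Nodup := List.Nodup.of_map _ hnd
    have : (PySem.List.sorted X (fun q : String × String => toLex (q.1, q.2))).Nodup :=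
      (PySem.List.sorted_perm X _ false).nodup_iff.mpr hX
    exact this.map (fun a b hab => (Prod.ext_iff.mpr (Prod.mk.injEq _ _ _ _ ▸
      (by simpa using hab))))

theorem pvSorted2_filter (X : List (String × String)) (hnd : (X.map (fun q => q.2)).Nodup)
    (pred : String × String → Bool) :
    (PySem.List.sorted2 X (fun q => q.1) (fun q => q.2)).filter pred
      = PySem.List.sorted2 (X.filter pred) (fun q => q.1) (fun q => q.2) := by
  rw [pvSorted2_eq, pvSorted2_eq]
  refine (PySem.List.sorted_eq_of_perm_of_pairwise_lt _ _ _ ?_ ?_).symm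
  · exact List.Perm.filter pred (PySem.List.sorted_perm X _ false)
  · exact List.Pairwise.sublist List.filter_sublist
      (by rw [← pvSorted2_eq]; exact pvSorted2_pairwise_lt X hnd)

-- ---- the status table lookup agrees with the scan ----

theorem pvStatus_eq (st : String) :
    pvFindHtmlStatus pvHTML_STATUS st = pvStatusMap.get? st := by
  have h : pvStatusMap = PySem.Dict.mk
    [("known", ("green", "matching the name hash")),
     ("unknown", ("orange", "unknown")),
     ("wrong", ("red", "not matching the name hash")),
     ("nok_from_previous", ("yellow", "obfuscated but matching a previous non-obfuscated name")),
     ("nok_dubious", ("brown", "obfuscated but found from an unknown source")),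
     ("unknown_nonobf", ("orange", "unknown and non-obfuscated")),
     ("unknown_obf", ("grey", "unknown but obfuscated"))] := by rfl
  rw [h]
  simp only [pvHTML_STATUS, pvFindHtmlStatus, PySem.Dict.get?_mk_cons]
  repeat' split
  all_goals simp_all [beq_iff_eq, PySem.Dict.get?]

-- ---- the two row renderings agree ----

theorem pvRowCellsB (entries : PySem.Dict String (String × String × String)) :
    ∀ (vs : List String) (c1 c2 : List String) (last : Option String),
    vs.foldl (pvStepB entries) (c1 ++ c2, last)
      = (c1 ++ (vs.foldl (pvStepB entries) (c2, last)).1, (vs.foldl (pvStepB entries) (c2, last)).2) := by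
  intro vs
  induction vs with
  | nil => intro c1 c2 last; simp
  | cons v rest ih =>
    intro c1 c2 last
    simp only [List.foldl_cons]
    cases h : entries.get? v <;> simp only [pvStepB, h] <;>
      · rw [List.append_assoc]; exact ih _ _ _

theorem pvRowCellsB' (entries : PySem.Dict String (String × String × String))
    (vs : List String) (c : List String) (last : Option String) :
    vs.foldl (pvStepB entries) (c, last)
      = (c ++ (vs.foldl (pvStepB entries) ([], last)).1, (vs.foldl (pvStepB entries) ([], last)).2) := by
  have h := pvRowCellsB entries vs c [] last
  simpa using h

theorem pvRowFold (entries : PySem.Dict String (String × String × String)) :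
    ∀ (vs : List String) (s : String) (last : Option String),
    vs.foldl (pvStepA entries) (s, last)
      = (s ++ PySem.Str.join "" ((vs.foldl (pvStepB entries) ([], last)).1),
         (vs.foldl (pvStepB entries) ([], last)).2) := by
  intro vs
  induction vs with
  | nil => intro s last; simp [pvJoin_nil]
  | cons v rest ih =>
    intro s last
    simp only [List.foldl_cons]
    cases h : entries.get? v with
    | none =>
      simp only [pvStepA, pvStepB, h, List.nil_append]
      rw [ih, pvRowCellsB' entries rest ["<td></td>"] last]
      simp [pvJoin_cons, String.append_assoc]
    | some t =>
      simp only [pvStepA, pvStepB, h, pvStatus_eq, List.nil_append]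
      rw [ih, pvRowCellsB' entries rest [_] (some t.2.1)]
      simp [pvJoin_cons, String.append_assoc]

-- ---- characterising the ordering lists ----

theorem pvInner_fst (v : String) :
    ∀ (l : List pvRowT) (q0 : List (String × String) × PySem.Dict String String),
    (l.foldl (pvStepInner v) q0).1
      = q0.1 ++ (l.filter (fun p => (p.2.get? v).isSome)).map (fun p => (pvNmAt v p, p.1)) := by
  intro l
  induction l with
  | nil => intro q0; simp
  | cons p rest ih =>
    intro q0
    simp only [List.foldl_cons]
    cases h : p.2.get? v with
    | none => simp only [pvStepInner, h, List.filter_cons, Option.isSome_none]; simpa using ih q0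
    | some t =>
      simp only [pvStepInner, h, List.filter_cons, Option.isSome_some]
      rw [ih]
      simp [pvNmAt, h, List.append_assoc]

theorem pvDedup_eq :
    ∀ (l : List (String × String)) (acc : List String), (l.map (fun q => q.2)).Nodup →
    l.foldl (fun sn q => if q.2 ∈ sn then sn else sn ++ [q.2]) acc
      = acc ++ (l.filter (fun q => decide (q.2 ∉ acc))).map (fun q => q.2) := by
  intro l
  induction l with
  | nil => intro acc _; simp
  | cons q rest ih =>
    intro acc hnd
    simp only [List.map_cons, List.nodup_cons] at hnd
    simp only [List.foldl_cons, List.filter_cons]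
    by_cases hm : q.2 ∈ acc
    · simp only [hm, if_pos hm, decide_eq_true_eq]
      rw [ih _ hnd.2]
      simp [hm]
    · simp only [if_neg hm]
      rw [ih _ hnd.2]
      have hfc : rest.filter (fun x => decide (x.2 ∉ acc ++ [q.2]))
          = rest.filter (fun x => decide (x.2 ∉ acc)) := by
        apply List.filter_congr
        intro x hx
        have hne : x.2 ≠ q.2 := by
          intro he; exact hnd.1 (he ▸ List.mem_map_of_mem hx)
        simp [List.mem_append, hne]
      rw [hfc]
      simp [hm, List.append_assoc]

theorem pvMem_block (versions : List String) (items : List pvRowT) (k : Nat) (x : String) :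
    x ∈ pvBlock versions items k
      ↔ ∃ p, p ∈ items ∧ pvFIdx versions p = k ∧ p.1 = x := by
  unfold pvBlock
  rw [List.mem_map]
  constructor
  · rintro ⟨q, hq, rfl⟩
    rw [(PySem.List.sorted2_perm _ _ _ _).mem_iff] at hq
    unfold pvNewPairs at hq
    rw [List.mem_map] at hq
    obtain ⟨p, hp, rfl⟩ := hq
    rw [List.mem_filter] at hp
    exact ⟨p, hp.1, by simpa using hp.2, rfl⟩
  · rintro ⟨p, hp, hk, rfl⟩
    refine ⟨(pvNm versions p, p.1), ?_, rfl⟩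
    rw [(PySem.List.sorted2_perm _ _ _ _).mem_iff]
    unfold pvNewPairs
    rw [List.mem_map]
    exact ⟨p, List.mem_filter.mpr ⟨hp, by simpa using hk⟩, rfl⟩

theorem pvMem_CCn (versions : List String) (items : List pvRowT) (m : Nat) (x : String) :
    x ∈ pvCCn versions items m
      ↔ ∃ p, p ∈ items ∧ p.1 = x ∧ pvFIdx versions p < m := by
  unfold pvCCn
  rw [List.mem_flatMap]
  constructor
  · rintro ⟨k, hk, hx⟩
    rw [List.mem_range] at hk
    obtain ⟨p, hp, hfk, rfl⟩ := (pvMem_block _ _ _ _).mp hx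
    exact ⟨p, hp, rfl, hfk ▸ hk⟩
  · rintro ⟨p, hp, rfl, hlt⟩
    exact ⟨pvFIdx versions p, List.mem_range.mpr hlt,
      (pvMem_block _ _ _ _).mpr ⟨p, hp, rfl, rfl⟩⟩

theorem pvNodup_filter_keys (items : List pvRowT)
    (hnd : (items.map (fun p => p.1)).Nodup) (f : pvRowT → Bool) :
    ((items.filter f).map (fun p => p.1)).Nodup :=
  hnd.sublist (List.Sublist.map _ List.filter_sublist)

theorem pvFIdx_le (versions : List String) (p : pvRowT) (j : Nat) (hj : j < versions.length)
    (hc : p.2.contains (versions[j]'hj) = true) : pvFIdx versions p ≤ j := by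
  by_contra hlt
  have hj2 : j < List.findIdx (fun v => p.2.contains v) versions := by
    unfold pvFIdx at hlt; omega
  have := List.not_of_lt_findIdx hj2
  exact Bool.noConfusion (this.symm.trans hc)

theorem pvFIdx_contains (versions : List String) (p : pvRowT)
    (h : pvFIdx versions p < versions.length) :
    p.2.contains (versions[pvFIdx versions p]'h) = true :=
  List.findIdx_getElem

theorem pvCCn_succ (versions : List String) (items : List pvRowT) (m : Nat) :
    pvCCn versions items (m + 1) = pvCCn versions items m ++ pvBlock versions items m := by
  unfold pvCCn
  rw [List.range_succ, List.flatMap_append]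
  simp

theorem pvAstep (versions : List String) (items : List pvRowT)
    (hnd : (items.map (fun p => p.1)).Nodup)
    (pre rest : List String) (v : String) (hv : versions = pre ++ v :: rest)
    (src : PySem.Dict String String) :
    (PySem.List.sorted2 ((items.foldl (pvStepInner v) (([] : List (String × String)), src)).1)
        (fun q => q.1) (fun q => q.2)).foldl
      (fun sn q => if q.2 ∈ sn then sn else sn ++ [q.2]) (pvCCn versions items pre.length)
    = pvCCn versions items (pre.length + 1) := by
  have hk : pre.length < versions.length := by rw [hv]; simp
  have hvk : versions[pre.length]'hk = v := by
    have h1 : versions[pre.length]? = some v := by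
      rw [hv, List.getElem?_append_right (le_refl _)]; simp
    have h2 := List.getElem?_eq_getElem (l := versions) (i := pre.length) hk
    rw [h1] at h2; exact (Option.some.injEq _ _).mp h2.symm
  rw [pvInner_fst v items ([], src)]
  simp only [List.nil_append]
  set acc := pvCCn versions items pre.length with hacc
  set P := (items.filter (fun p => (p.2.get? v).isSome)).map (fun p => (pvNmAt v p, p.1)) with hP
  have hPnd : (P.map (fun q => q.2)).Nodup := by
    rw [hP, List.map_map]
    exact pvNodup_filter_keys items hnd _
  have hSnd : ((PySem.List.sorted2 P (fun q => q.1) (fun q => q.2)).map (fun q => q.2)).Nodup :=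
    (List.Perm.map _ (PySem.List.sorted2_perm P _ _ _)).nodup_iff.mpr hPnd
  rw [pvDedup_eq _ _ hSnd]
  rw [pvSorted2_filter P hPnd _]
  have hmem : ∀ p ∈ items, (p.1 ∈ acc ↔ pvFIdx versions p < pre.length) := by
    intro p hp
    constructor
    · intro hin
      obtain ⟨p', hp', he, hlt⟩ := (pvMem_CCn versions items pre.length p.1).mp hin
      have : p' = p := List.inj_on_of_nodup_map hnd hp' hp he
      exact this ▸ hlt
    · intro hlt
      exact (pvMem_CCn versions items pre.length p.1).mpr ⟨p, hp, rfl, hlt⟩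
  have hPfilter : P.filter (fun q => decide (q.2 ∉ acc)) = pvNewPairs versions items pre.length := by
    rw [hP, List.filter_map]
    have hcomp : ((fun q : String × String => decide (q.2 ∉ acc)) ∘ (fun p : pvRowT => (pvNmAt v p, p.1)))
        = (fun p : pvRowT => decide (p.1 ∉ acc)) := rfl
    rw [hcomp, List.filter_filter]
    have hpred : ∀ p ∈ items,
        (decide (p.1 ∉ acc) && (p.2.get? v).isSome) = (pvFIdx versions p == pre.length) := by
      intro p hp
      by_cases hs : (p.2.get? v).isSome = true
      · have hcont : p.2.contains (versions[pre.length]'hk) = true := by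
          rw [hvk, PySem.Dict.contains_eq_isSome_get?]; exact hs
        have hle := pvFIdx_le versions p pre.length hk hcont
        have hiff : (p.1 ∉ acc) ↔ (pvFIdx versions p = pre.length) := by
          rw [not_congr (hmem p hp)]; omega
        simp only [hs, Bool.and_true]
        by_cases hq : pvFIdx versions p = pre.length <;> simp [hiff, hq]
      · have hne : pvFIdx versions p ≠ pre.length := by
          intro he
          have h1 : pvFIdx versions p < versions.length := by omega
          have h2 := pvFIdx_contains versions p h1
          rw [PySem.Dict.contains_eq_isSome_get?] at h2
          simp only [he, hvk] at h2
          exact hs h2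
        simp only [Bool.not_eq_true] at hs
        simp [hs, hne]
    rw [List.filter_congr hpred]
    unfold pvNewPairs
    apply List.map_congr_left
    intro p hp
    rw [List.mem_filter] at hp
    have hfk : pvFIdx versions p = pre.length := by simpa using hp.2
    have : pvNm versions p = pvNmAt v p := by
      unfold pvNm pvNmAt
      rw [hfk, List.getElem?_eq_getElem hk, hvk]
      rfl
    rw [this]
  rw [hPfilter, pvCCn_succ]
  rfl

theorem pvAouter (versions : List String) (items : List pvRowT)
    (hnd : (items.map (fun p => p.1)).Nodup) :
    ∀ (suf pre : List String) (src : PySem.Dict String String), versions = pre ++ suf →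
    (suf.foldl (pvStepOuter items) (pvCCn versions items pre.length, src)).1
      = pvCCn versions items versions.length := by
  intro suf
  induction suf with
  | nil =>
    intro pre src hv
    rw [List.append_nil] at hv
    subst hv
    rfl
  | cons v rest ih =>
    intro pre src hv
    simp only [List.foldl_cons]
    have hstep : pvStepOuter items (pvCCn versions items pre.length, src) v
        = (pvCCn versions items (pre.length + 1),
           (items.foldl (pvStepInner v) (([] : List (String × String)), src)).2) := by
      unfold pvStepOuter
      dsimp only
      rw [pvAstep versions items hnd pre rest v hv src]
    rw [hstep]
    have := ih (pre ++ [v]) ((items.foldl (pvStepInner v) (([] : List (String × String)), src)).2)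
      (by rw [hv]; simp)
    simpa using this

theorem pvOrdA (versions : List String) (items : List pvRowT)
    (hnd : (items.map (fun p => p.1)).Nodup) :
    (versions.foldl (pvStepOuter items)
        (([] : List String), (PySem.Dict.empty : PySem.Dict String String))).1
      = pvCCn versions items versions.length := by
  have h0 : pvCCn versions items 0 = [] := rfl
  have := pvAouter versions items hnd versions [] PySem.Dict.empty rfl
  rw [List.length_nil, h0] at this
  exact this

-- ---- B's ordering ----

theorem pvFind_enum (f : String → Bool) :
    ∀ (vs : List String) (s : Int),
    (PySem.List.enumerate vs s).find? (fun q => f q.2)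
      = (vs[vs.findIdx f]?).map (fun v => ((s + vs.findIdx f : Int), v)) := by
  intro vs
  induction vs with
  | nil => intro s; simp [PySem.List.enumerate]
  | cons x xs ih =>
    intro s
    rw [PySem.List.enumerate_cons]
    cases hfx : f x with
    | true => simp [List.find?_cons, hfx, List.findIdx_cons]
    | false =>
      have h1 : List.find? (fun q => f q.2) ((s, x) :: PySem.List.enumerate xs (s + 1))
          = List.find? (fun q => f q.2) (PySem.List.enumerate xs (s + 1)) := by
        rw [List.find?_cons]; simp [hfx]
      rw [h1, ih (s + 1), List.findIdx_cons, hfx]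
      simp only [cond_false, List.getElem?_cons_succ]
      cases h2 : xs[List.findIdx f xs]? with
      | none => simp
      | some w => simp; omega

theorem pvFS_items (versions : List String) :
    ∀ (l : List pvRowT) (d : PySem.Dict String (Int × String × String)),
    (∀ p ∈ l, d.contains p.1 = false) → ((l.map (fun p => p.1)).Nodup) →
    (l.foldl (pvStepFS versions) d).items
      = d.items ++ (l.filter (fun p => decide (pvFIdx versions p < versions.length))).map
          (fun p => (p.1, pvTriple versions p)) := by
  intro l
  induction l with
  | nil => intro d _ _; simp
  | cons p rest ih =>
    intro d hc hnd
    simp only [List.map_cons, List.nodup_cons] at hnd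
    simp only [List.foldl_cons, List.filter_cons]
    have hfe := pvFind_enum (fun v => p.2.contains v) versions 0
    by_cases hp : pvFIdx versions p < versions.length
    · have hge : versions[pvFIdx versions p]? = some (versions[pvFIdx versions p]'hp) :=
        List.getElem?_eq_getElem hp
      have hcont := pvFIdx_contains versions p hp
      rw [PySem.Dict.contains_eq_isSome_get?] at hcont
      obtain ⟨t, ht⟩ := Option.isSome_iff_exists.mp hcont
      have hstep : pvStepFS versions d p = d.insert p.1 (((pvFIdx versions p : Nat) : Int), t.2.1, p.1) := by
        unfold pvStepFS pvFIdx
        rw [hfe]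
        unfold pvFIdx at hge
        rw [hge]
        simp only [Option.map_some]
        unfold pvFIdx at ht
        rw [ht]
        simp
      rw [hstep]
      rw [ih _ ?_ hnd.2]
      · have hitems := PySem.Dict.items_insert_of_not_contains (d := d)
          (k := p.1) (v := (((pvFIdx versions p : Nat) : Int), t.2.1, p.1)) (hc p (by simp))
        rw [hitems]
        have htr : pvTriple versions p = (((pvFIdx versions p : Nat) : Int), t.2.1, p.1) := by
          unfold pvTriple pvNm
          rw [hge]
          simp [ht]
        simp [hp, htr, List.append_assoc]
      · intro q hq
        rw [PySem.Dict.contains_insert]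
        have h1 : (q.1 == p.1) = false := by
          have : q.1 ≠ p.1 := by
            intro he; exact hnd.1 (he ▸ List.mem_map_of_mem hq)
          simpa using this
        rw [h1, hc q (by simp [hq])]
        rfl
    · have hge : versions[pvFIdx versions p]? = none :=
        List.getElem?_eq_none (by unfold pvFIdx at hp ⊢; omega)
      have hstep : pvStepFS versions d p = d := by
        unfold pvStepFS
        rw [hfe]
        unfold pvFIdx at hge
        rw [hge]
        rfl
      rw [hstep, ih _ (fun q hq => hc q (by simp [hq])) hnd.2]
      simp [hp]

theorem pvVals (versions : List String) (items : List pvRowT)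
    (hnd : (items.map (fun p => p.1)).Nodup) :
    (items.foldl (pvStepFS versions) PySem.Dict.empty).values
      = (items.filter (fun p => decide (pvFIdx versions p < versions.length))).map
          (fun p => pvTriple versions p) := by
  have h := pvFS_items versions items PySem.Dict.empty (by intro p _; rfl) hnd
  show (items.foldl (pvStepFS versions) PySem.Dict.empty).items.map (fun x => x.2) = _
  rw [h]
  simp [Function.comp_def,
    show (PySem.Dict.empty : PySem.Dict String (Int × String × String)).items = [] from rfl]

theorem pvCCTn_succ (versions : List String) (items : List pvRowT) (m : Nat) :
    pvCCTn versions items (m + 1) = pvCCTn versions items m ++ pvBlockT versions items m := by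
  unfold pvCCTn
  rw [List.range_succ, List.flatMap_append]
  simp

theorem pvBlockT_fst (versions : List String) (items : List pvRowT) (k : Nat) :
    ∀ t ∈ pvBlockT versions items k, t.1 = (k : Int) := by
  intro t ht
  unfold pvBlockT at ht
  rw [List.mem_map] at ht
  obtain ⟨q, _, rfl⟩ := ht
  rfl

theorem pvCCTn_fst_lt (versions : List String) (items : List pvRowT) (m : Nat) :
    ∀ t ∈ pvCCTn versions items m, ∃ j, j < m ∧ t.1 = (j : Int) := by
  intro t ht
  unfold pvCCTn at ht
  rw [List.mem_flatMap] at ht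
  obtain ⟨k, hk, htk⟩ := ht
  exact ⟨k, List.mem_range.mp hk, pvBlockT_fst versions items k t htk⟩

theorem pvBlockT_pairwise (versions : List String) (items : List pvRowT)
    (hnd : (items.map (fun p => p.1)).Nodup) (k : Nat) :
    (pvBlockT versions items k).Pairwise (fun a b => pvKey3 a < pvKey3 b) := by
  unfold pvBlockT
  rw [List.pairwise_map]
  have hnp : ((pvNewPairs versions items k).map (fun q => q.2)).Nodup := by
    unfold pvNewPairs; rw [List.map_map]; exact pvNodup_filter_keys items hnd _
  have hpw := pvSorted2_pairwise_lt (pvNewPairs versions items k) hnp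
  apply hpw.imp
  intro a b hab
  unfold pvKey3
  apply Prod.Lex.lt_iff.mpr
  right
  exact ⟨rfl, by simpa using hab⟩

theorem pvCCTn_pairwise (versions : List String) (items : List pvRowT)
    (hnd : (items.map (fun p => p.1)).Nodup) :
    ∀ m, (pvCCTn versions items m).Pairwise (fun a b => pvKey3 a < pvKey3 b) := by
  intro m
  induction m with
  | zero => simp [pvCCTn]
  | succ n ih =>
    rw [pvCCTn_succ]
    rw [List.pairwise_append]
    refine ⟨ih, pvBlockT_pairwise versions items hnd n, ?_⟩
    intro a ha b hb
    obtain ⟨j, hj, hja⟩ := pvCCTn_fst_lt versions items n a ha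
    have hbn := pvBlockT_fst versions items n b hb
    unfold pvKey3
    apply Prod.Lex.lt_iff.mpr
    left
    show a.1 < b.1
    rw [hja, hbn]
    exact_mod_cast hj

theorem pvCCTn_perm (versions : List String) (items : List pvRowT)
    (hnd : (items.map (fun p => p.1)).Nodup) :
    ∀ m, (pvCCTn versions items m).Perm
      ((items.filter (fun p => decide (pvFIdx versions p < m))).map (fun p => pvTriple versions p)) := by
  intro m
  induction m with
  | zero =>
    have : items.filter (fun p => decide (pvFIdx versions p < 0)) = [] := by
      rw [show (fun p : pvRowT => decide (pvFIdx versions p < 0)) = (fun _ => false) by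
        funext p; simp]
      exact List.filter_false _
    simp [pvCCTn, this]
  | succ n ih =>
    rw [pvCCTn_succ]
    have hblock : (pvBlockT versions items n).Perm
        ((items.filter (fun p => pvFIdx versions p == n)).map (fun p => pvTriple versions p)) := by
      unfold pvBlockT
      have h1 : ((PySem.List.sorted2 (pvNewPairs versions items n) (fun q => q.1) (fun q => q.2)).map
          (fun q => ((n : Int), q.1, q.2))).Perm
          ((pvNewPairs versions items n).map (fun q => ((n : Int), q.1, q.2))) :=
        List.Perm.map _ (PySem.List.sorted2_perm _ _ _ _)
      have h2 : (pvNewPairs versions items n).map (fun q => ((n : Int), q.1, q.2))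
          = (items.filter (fun p => pvFIdx versions p == n)).map (fun p => pvTriple versions p) := by
        unfold pvNewPairs
        rw [List.map_map]
        apply List.map_congr_left
        intro p hp
        rw [List.mem_filter] at hp
        have : pvFIdx versions p = n := by simpa using hp.2
        unfold pvTriple
        simp [Function.comp, this]
      rw [h2] at h1
      exact h1
    have hsplit : ((items.filter (fun p => decide (pvFIdx versions p < n)))
          ++ (items.filter (fun p => pvFIdx versions p == n))).Perm
        (items.filter (fun p => decide (pvFIdx versions p < n + 1))) := by
      have h1 : (items.filter (fun p => decide (pvFIdx versions p < n + 1))).filter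
            (fun p => decide (pvFIdx versions p < n))
          = items.filter (fun p => decide (pvFIdx versions p < n)) := by
        rw [List.filter_filter]
        apply List.filter_congr
        intro p _
        by_cases h : pvFIdx versions p < n <;> simp [h] <;> omega
      have h2 : (items.filter (fun p => decide (pvFIdx versions p < n + 1))).filter
            (fun p => !decide (pvFIdx versions p < n))
          = items.filter (fun p => pvFIdx versions p == n) := by
        rw [List.filter_filter]
        apply List.filter_congr
        intro p _
        by_cases h : pvFIdx versions p = n
        · simp [h]
        · have : ((pvFIdx versions p == n) = false) := by simpa using h
          rw [this]
          by_cases h3 : pvFIdx versions p < n <;> simp [h3] <;> omega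
      have h3 := List.filter_append_perm (fun p => decide (pvFIdx versions p < n))
        (items.filter (fun p => decide (pvFIdx versions p < n + 1)))
      rw [h1, h2] at h3
      exact h3
    have hA := List.Perm.append ih hblock
    have hB := List.Perm.map (fun p => pvTriple versions p) hsplit
    rw [List.map_append] at hB
    exact hA.trans hB

theorem pvCCT_map (versions : List String) (items : List pvRowT) (m : Nat) :
    (pvCCTn versions items m).map (fun t => t.2.2) = pvCCn versions items m := by
  unfold pvCCTn pvCCn pvBlockT pvBlock
  rw [List.map_flatMap]
  congr 1
  funext k
  rw [List.map_map]
  rfl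

theorem pvOrdB (versions : List String) (items : List pvRowT)
    (hnd : (items.map (fun p => p.1)).Nodup) :
    PySem.List.sorted ((items.foldl (pvStepFS versions) PySem.Dict.empty).values)
        (fun t => toLex (t.1, toLex (t.2.1, t.2.2)))
      = pvCCTn versions items versions.length := by
  rw [pvVals versions items hnd]
  exact PySem.List.sorted_eq_of_perm_of_pairwise_lt _ _ pvKey3
    (pvCCTn_perm versions items hnd versions.length)
    (pvCCTn_pairwise versions items hnd versions.length)

-- ---- canonical forms of the two ports ----

def pvHead (module : String) (lib : String) : String := "<!DOCTYPE html>\n<html>\n<title>PSP NID Status for " ++ lib ++ " in " ++ module ++ "</title>\n<meta name=\"viewport\" content=\"width=device-width, initial-scale=1\">\n<link rel=\"stylesheet\" href=\"https://www.w3schools.com/w3css/4/w3.css\">\n<body>\n<div class=\"w3-container\" style=\"height:100vh; width:100vw; overflow: scroll;\">\n<h1>" ++ module ++ ": " ++ lib ++ "</h1>\n<p>\nThis page contains the status of all the NIDs from the " ++ lib ++ " library inside the " ++ module ++ " module.<br />\nHover a cell to know the meaning of the color. <br />\n\"...\" means the given name is the same as the one on its left. <br />\n</p>\n"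

def pvPortA (module : String) (lib : String)
    (sb : List (String × List (String × String × String × String))) (versions : List String) : String :=
  let stats := pvStats sb
  let o2 := pvHead module lib ++ "<table class=\"w3-table\"><tr><th>NID</th>"
  let o3 := versions.foldl (fun out v => out ++ ("<th>" ++ v ++ "</th>")) o2
  let o4 := o3 ++ "</tr>"
  let st := versions.foldl (pvStepOuter stats.items)
    (([] : List String), (PySem.Dict.empty : PySem.Dict String String))
  let o5 := st.1.foldl (fun out nid =>
      (versions.foldl (pvStepA ((stats.get? nid).getD PySem.Dict.empty))
        (out ++ ("<tr><td>" ++ nid ++ "</td>"), (none : Option String))).1 ++ "</tr>") o4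
  o5 ++ "</table></div></body></html>"

def pvPortB (module : String) (lib : String)
    (sb : List (String × List (String × String × String × String))) (versions : List String) : String :=
  let stats := pvStats sb
  let header_row := "<table class=\"w3-table\"><tr><th>NID</th>"
    ++ PySem.Str.join "" (versions.map (fun v => "<th>" ++ v ++ "</th>")) ++ "</tr>"
  let fs := stats.items.foldl (pvStepFS versions) PySem.Dict.empty
  let rows := PySem.Str.join ""
    ((PySem.List.sorted fs.values (fun t => toLex (t.1, toLex (t.2.1, t.2.2)))).map
      (fun t => pvRenderRow t.2.2 ((stats.get? t.2.2).getD PySem.Dict.empty) versions))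
  pvHead module lib ++ header_row ++ rows ++ "</table></div></body></html>"

theorem pvPortA_defeq (module lib : String)
    (sb : List (String × List (String × String × String × String))) (versions : List String) :
    html_single_library module lib sb versions = pvPortA module lib sb versions := rfl

theorem pvPortB_defeq (module lib : String)
    (sb : List (String × List (String × String × String × String))) (versions : List String) :
    html_single_library_alt module lib sb versions = pvPortB module lib sb versions := rfl

theorem pvRenderRow_eq (nid : String) (entries : PySem.Dict String (String × String × String))
    (versions : List String) :
    pvRenderRow nid entries versions
      = "<tr><td>" ++ nid ++ "</td>"
        ++ PySem.Str.join "" ((versions.foldl (pvStepB entries) ([], none)).1) ++ "</tr>" := rfl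

theorem pvNodupItems (sb : List (String × List (String × String × String × String))) :
    ((pvStats sb).items.map (fun p => p.1)).Nodup :=
  PySem.Dict.nodup_keys_ofList _

theorem pvPortA_canon (module lib : String)
    (sb : List (String × List (String × String × String × String))) (versions : List String) :
    pvPortA module lib sb versions = pvOut module lib sb versions := by
  unfold pvPortA pvOut
  dsimp only
  have hnd := pvNodupItems sb
  rw [pvOrdA versions (pvStats sb).items hnd]
  rw [pvFoldlStr versions (fun v => "<th>" ++ v ++ "</th>")]
  have hrow : ∀ (out : String) (nid : String), nid ∈ pvCCn versions (pvStats sb).items versions.length →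
      (versions.foldl (pvStepA (((pvStats sb).get? nid).getD PySem.Dict.empty))
        (out ++ ("<tr><td>" ++ nid ++ "</td>"), (none : Option String))).1 ++ "</tr>"
      = out ++ pvRenderRow nid (((pvStats sb).get? nid).getD PySem.Dict.empty) versions := by
    intro out nid _
    rw [pvRowFold (((pvStats sb).get? nid).getD PySem.Dict.empty) versions
      (out ++ ("<tr><td>" ++ nid ++ "</td>")) none]
    rw [pvRenderRow_eq]
    simp [String.append_assoc]
  have hfold :
      (pvCCn versions (pvStats sb).items versions.length).foldl
        (fun out nid => (versions.foldl (pvStepA (((pvStats sb).get? nid).getD PySem.Dict.empty))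
          (out ++ ("<tr><td>" ++ nid ++ "</td>"), (none : Option String))).1 ++ "</tr>")
        (pvHead module lib ++ "<table class=\"w3-table\"><tr><th>NID</th>"
          ++ PySem.Str.join "" (versions.map (fun v => "<th>" ++ v ++ "</th>")) ++ "</tr>")
      = (pvCCn versions (pvStats sb).items versions.length).foldl
        (fun out nid => out ++ pvRenderRow nid (((pvStats sb).get? nid).getD PySem.Dict.empty) versions)
        (pvHead module lib ++ "<table class=\"w3-table\"><tr><th>NID</th>"
          ++ PySem.Str.join "" (versions.map (fun v => "<th>" ++ v ++ "</th>")) ++ "</tr>") :=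
    PySem.List.foldl_congr_mem _ _ _ _ (fun acc x hx => hrow acc x hx)
  rw [hfold, pvFoldlStr]
  simp [String.append_assoc, pvHead]

theorem pvPortB_canon (module lib : String)
    (sb : List (String × List (String × String × String × String))) (versions : List String) :
    pvPortB module lib sb versions = pvOut module lib sb versions := by
  unfold pvPortB pvOut
  dsimp only
  have hnd := pvNodupItems sb
  rw [pvOrdB versions (pvStats sb).items hnd]
  rw [← pvCCT_map versions (pvStats sb).items versions.length, List.map_map]
  simp [String.append_assoc, Function.comp_def, pvHead]
  rw [← String.append_assoc]
  simp

-- ===== VERDICT (by name: the statement is the Claim_ definition above) =====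
theorem html_single_library_spec : Claim_equal_html_single_library := by
  intro module lib stats_bynid versions _ _
  unfold Spec_html_single_library
  rw [pvPortA_defeq, pvPortB_defeq, pvPortA_canon, pvPortB_canon]
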